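-- pv_equiv track=rewrite | github.com/badubidabambirimbum/Ya_Training_5 | ДЗ4/F.py | starting
-- ===== SOURCE A (Python) =====
-- def starting(points):
--     arr = [[points[0][0], 0, 0]]
--     last = points[0][0]
--     for i in range(1, len(points)):
--         if last != points[i][0]:
--             arr[-1][2] = i - 1
--             arr.append([points[i][0], i, 0])
--             last = points[i][0]
--     arr[-1][2] = len(points) - 1
--     return arr
-- ===== SOURCE B (Python) =====
-- def starting(points):
--     n = len(points)
--     bounds = [0] + [i for i in range(1, n) if points[i][0] != points[i - 1][0]] + [n]
--     return [[points[b][0], b, e - 1] for b, e in zip(bounds, bounds[1:])]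
-- ===== Notes on version B (the rewrite author's own statement) =====
-- stated objective: alternative
-- what changed: A does one pass keeping a running 'last' value and back-patching the end index of the most recent record; B first computes the list of boundary indices where x changes and then builds each record from consecutive boundary pairs in a separate pass, with no mutation or back-patching.
import Mathlib
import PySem

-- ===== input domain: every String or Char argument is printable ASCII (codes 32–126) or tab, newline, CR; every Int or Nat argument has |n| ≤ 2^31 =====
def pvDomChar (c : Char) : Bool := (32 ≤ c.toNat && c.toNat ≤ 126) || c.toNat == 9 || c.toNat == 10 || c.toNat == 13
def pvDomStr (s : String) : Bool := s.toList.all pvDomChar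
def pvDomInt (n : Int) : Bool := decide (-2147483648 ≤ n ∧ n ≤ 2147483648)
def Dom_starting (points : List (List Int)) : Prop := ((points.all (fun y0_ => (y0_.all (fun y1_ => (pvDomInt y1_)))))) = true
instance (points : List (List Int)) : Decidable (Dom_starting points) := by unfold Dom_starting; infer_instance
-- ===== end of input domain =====

-- B replaces A's single pass with running 'last' and back-patching by a two-pass scheme
-- (boundary indices first, then records from consecutive boundary pairs); alternative, same cost.

-- ===== PORT A =====
-- arr[-1][2] = v  (replace field 2 of the last row; arr is never empty where A executes this)
def pvPatchLast (arr : List (List Int)) (v : Int) : List (List Int) :=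
  arr.dropLast ++ (match arr.getLast? with
                   | some r => [r.set 2 v]
                   | none => [])

def starting (points : List (List Int)) : List (List Int) :=
  let arr0 : List (List Int) := [[PySem.List.pyGetD (PySem.List.pyGetD points 0 []) 0 0, 0, 0]]
  let last0 : Int := PySem.List.pyGetD (PySem.List.pyGetD points 0 []) 0 0
  let s := (PySem.List.pyRange 1 (points.length : Int) 1).foldl
    (fun (st : List (List Int) × Int) (i : Int) =>
      if st.2 ≠ PySem.List.pyGetD (PySem.List.pyGetD points i []) 0 0 then
        (pvPatchLast st.1 (i - 1) ++
           [[PySem.List.pyGetD (PySem.List.pyGetD points i []) 0 0, i, 0]],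
         PySem.List.pyGetD (PySem.List.pyGetD points i []) 0 0)
      else st)
    (arr0, last0)
  pvPatchLast s.1 ((points.length : Int) - 1)

-- ===== PORT B =====
def starting_alt (points : List (List Int)) : List (List Int) :=
  let n : Int := (points.length : Int)
  let bounds : List Int :=
    0 :: ((PySem.List.pyRange 1 n 1).filter
      (fun i => decide (PySem.List.pyGetD (PySem.List.pyGetD points i []) 0 0 ≠
                        PySem.List.pyGetD (PySem.List.pyGetD points (i - 1) []) 0 0)) ++ [n])
  (bounds.zip (PySem.List.slice bounds (some 1) none)).map
    (fun be => [PySem.List.pyGetD (PySem.List.pyGetD points be.1 []) 0 0, be.1, be.2 - 1])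

-- ===== PRECONDITION & SPEC =====
-- Pre_ excludes exactly the inputs where the Python A raises IndexError: the empty list
-- (points[0] fails) and lists containing an empty row (points[i][0] fails); B raises there too.
def Pre_starting (points : List (List Int)) : Prop :=
  points ≠ [] ∧ ∀ r ∈ points, r ≠ []
instance (points : List (List Int)) : Decidable (Pre_starting points) := by
  unfold Pre_starting; infer_instance

def pvWitness_starting : List (List Int) := [[1, 7], [1, 8], [2, 9]]

def Spec_starting (points : List (List Int)) (out : List (List Int)) : Prop := out = starting_alt points
instance (points : List (List Int)) (out : List (List Int)) : Decidable (Spec_starting points out) := by unfold Spec_starting; infer_instance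

-- ===== CLAIM (what is proved, stated in full; the proofs are below) =====
def Claim_equal_starting : Prop := ∀ (points : List (List Int)), Dom_starting points → Pre_starting points → Spec_starting points (starting points)

-- ===== LEMMAS AND PROOFS =====

-- x-coordinate of row i (the shared pyGetD expression, definitionally equal to both ports' uses)
def pvx (points : List (List Int)) (i : Int) : Int :=
  PySem.List.pyGetD (PySem.List.pyGetD points i []) 0 0

-- records from consecutive boundary pairs
def pvPairs (points : List (List Int)) : List Int → List (List Int)
  | b0 :: b1 :: rest => [pvx points b0, b0, b1 - 1] :: pvPairs points (b1 :: rest)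
  | _ => []

-- A's arr after processing boundaries b (last record's end still 0)
def pvGo (points : List (List Int)) : List Int → List (List Int)
  | [] => []
  | [b] => [[pvx points b, b, 0]]
  | b0 :: b1 :: rest => [pvx points b0, b0, b1 - 1] :: pvGo points (b1 :: rest)

-- the change-boundary list up to (exclusive) k
def pvC (points : List (List Int)) (k : Int) : List Int :=
  (PySem.List.pyRange 1 k 1).filter (fun i => decide (pvx points i ≠ pvx points (i - 1)))

theorem pvGo_ne_nil (pts : List (List Int)) (b : Int) (l : List Int) :
    pvGo pts (b :: l) ≠ [] := by
  cases l <;> simp [pvGo]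

theorem pvPatchLast_cons (a : List Int) (l : List (List Int)) (v : Int) (h : l ≠ []) :
    pvPatchLast (a :: l) v = a :: pvPatchLast l v := by
  cases l with
  | nil => exact absurd rfl h
  | cons b t => simp [pvPatchLast]

theorem pv_patch_go (pts : List (List Int)) (m : Int) :
    ∀ (rest : List Int) (b0 : Int),
      pvPatchLast (pvGo pts (b0 :: rest)) (m - 1) = pvPairs pts (b0 :: rest ++ [m]) := by
  intro rest
  induction rest with
  | nil => intro b0; simp [pvGo, pvPairs, pvPatchLast, List.set]
  | cons b1 rest ih =>
      intro b0
      have h1 : pvGo pts (b0 :: b1 :: rest) = [pvx pts b0, b0, b1 - 1] :: pvGo pts (b1 :: rest) := by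
        simp [pvGo]
      rw [h1, pvPatchLast_cons _ _ _ (pvGo_ne_nil pts b1 rest), ih b1]
      simp [pvPairs]

theorem pv_go_append (pts : List (List Int)) (j : Int) :
    ∀ (rest : List Int) (b0 : Int),
      pvGo pts ((b0 :: rest) ++ [j]) =
        pvPatchLast (pvGo pts (b0 :: rest)) (j - 1) ++ [[pvx pts j, j, 0]] := by
  intro rest
  induction rest with
  | nil => intro b0; simp [pvGo, pvPatchLast, List.set]
  | cons b1 rest ih =>
      intro b0
      have h1 : pvGo pts (b0 :: b1 :: rest) = [pvx pts b0, b0, b1 - 1] :: pvGo pts (b1 :: rest) := by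
        simp [pvGo]
      have h2 : (b0 :: b1 :: rest) ++ [j] = b0 :: b1 :: (rest ++ [j]) := by simp
      rw [h2]
      have h3 : pvGo pts (b0 :: b1 :: (rest ++ [j])) =
          [pvx pts b0, b0, b1 - 1] :: pvGo pts (b1 :: (rest ++ [j])) := by simp [pvGo]
      rw [h3, h1, pvPatchLast_cons _ _ _ (pvGo_ne_nil pts b1 rest)]
      simp only [List.cons_append]
      exact congrArg _ (ih b1)

-- zip-with-tail pass of B equals the pair recursion
theorem pv_zip_pairs (pts : List (List Int)) :
    ∀ b : List Int,
      (b.zip b.tail).map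
        (fun be => [pvx pts be.1, be.1, be.2 - 1]) = pvPairs pts b := by
  intro b
  induction b with
  | nil => simp [pvPairs]
  | cons b0 rest ih =>
      cases rest with
      | nil => simp [pvPairs]
      | cons b1 rest' =>
          simp only [List.tail_cons, List.zip_cons_cons, List.map_cons, pvPairs]
          simp only [List.tail_cons] at ih
          rw [ih]

-- loop invariant for A's fold over range(1, k)
theorem pv_inv (pts : List (List Int)) :
    ∀ k : Nat, 1 ≤ k →
      (PySem.List.pyRange 1 (k : Int) 1).foldl
        (fun (st : List (List Int) × Int) (i : Int) =>
          if st.2 ≠ pvx pts i then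
            (pvPatchLast st.1 (i - 1) ++ [[pvx pts i, i, 0]], pvx pts i)
          else st)
        ([[pvx pts 0, 0, 0]], pvx pts 0)
      = (pvGo pts (0 :: pvC pts k), pvx pts ((k : Int) - 1)) := by
  intro k hk
  induction k with
  | zero => omega
  | succ k ih =>
      by_cases hk1 : k = 0
      · subst hk1
        rw [PySem.List.pyRange_one_eq_nil (by norm_num)]
        simp [pvC, PySem.List.pyRange_one_eq_nil, pvGo]
      · have hk' : 1 ≤ k := by omega
        have hcast : ((k + 1 : Nat) : Int) = (k : Int) + 1 := by push_cast; ring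
        rw [hcast, PySem.List.pyRange_one_succ_right (by exact_mod_cast hk'), List.foldl_append,
          ih hk']
        have hC : pvC pts ((k : Int) + 1) =
            pvC pts (k : Int) ++
              (if pvx pts (k : Int) = pvx pts ((k : Int) - 1)
               then [] else [(k : Int)]) := by
          unfold pvC
          rw [PySem.List.pyRange_one_succ_right (by exact_mod_cast hk'), List.filter_append]
          by_cases hp : pvx pts (k : Int) = pvx pts ((k : Int) - 1) <;>
            simp [List.filter, hp]
        by_cases h : pvx pts ((k : Int) - 1) = pvx pts (k : Int)
        · simp only [List.foldl_cons, List.foldl_nil]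
          rw [if_neg (by simp [h])]
          rw [hC, if_pos h.symm]
          rw [show ((k : Int) + 1 - 1) = (k : Int) by ring]
          simp [h]
        · simp only [List.foldl_cons, List.foldl_nil]
          rw [if_pos h]
          rw [hC, if_neg (fun e => h e.symm)]
          rw [show ((0 : Int) :: (pvC pts (k : Int) ++ [(k : Int)]))
              = ((0 : Int) :: pvC pts (k : Int)) ++ [(k : Int)] by simp]
          rw [pv_go_append pts (k : Int) (pvC pts (k : Int)) 0]
          rw [show ((k : Int) + 1 - 1) = (k : Int) by ring]

-- ===== VERDICT (by name: the statement is the Claim_ definition above) =====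
theorem starting_spec : Claim_equal_starting := by
  intro points _hdom hpre
  obtain ⟨hne, _⟩ := hpre
  unfold Spec_starting starting starting_alt
  have hlen : 1 ≤ points.length := by
    cases points with
    | nil => exact absurd rfl hne
    | cons a l => simp
  have hinv := pv_inv points points.length hlen
  simp only []
  rw [show (fun (st : List (List Int) × Int) (i : Int) =>
      if st.2 ≠ PySem.List.pyGetD (PySem.List.pyGetD points i []) 0 0 then
        (pvPatchLast st.1 (i - 1) ++
           [[PySem.List.pyGetD (PySem.List.pyGetD points i []) 0 0, i, 0]],
         PySem.List.pyGetD (PySem.List.pyGetD points i []) 0 0)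
      else st) = (fun (st : List (List Int) × Int) (i : Int) =>
      if st.2 ≠ pvx points i then
        (pvPatchLast st.1 (i - 1) ++ [[pvx points i, i, 0]], pvx points i)
      else st) from rfl]
  rw [show ([[PySem.List.pyGetD (PySem.List.pyGetD points 0 []) 0 0, 0, 0]],
        PySem.List.pyGetD (PySem.List.pyGetD points 0 []) 0 0)
      = (([[pvx points 0, 0, 0]], pvx points 0) : List (List Int) × Int) from rfl]
  rw [hinv]
  rw [pv_patch_go points (points.length : Int) (pvC points (points.length : Int)) 0]
  rw [PySem.List.slice_from_one]
  rw [show ((PySem.List.pyRange 1 ((points.length : Int)) 1).filter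
      (fun i => decide (PySem.List.pyGetD (PySem.List.pyGetD points i []) 0 0 ≠
                        PySem.List.pyGetD (PySem.List.pyGetD points (i - 1) []) 0 0)))
      = pvC points (points.length : Int) from rfl]
  rw [show (fun (be : Int × Int) =>
        [PySem.List.pyGetD (PySem.List.pyGetD points be.1 []) 0 0, be.1, be.2 - 1])
      = (fun (be : Int × Int) => [pvx points be.1, be.1, be.2 - 1]) from rfl]
  rw [pv_zip_pairs points]
  simp
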